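-- pv_equiv track=rewrite | github.com/shafiranaya/Tubes3_13519011 | extract_info.py | find_done_keyword
-- ===== SOURCE A (Python) =====
-- def build_last(pattern):
--     last = [-1 for i in range(128)]
--     for i in range (len(pattern)):
--         last[ord(pattern[i])] = i
--     return last
--
-- def boyer_moore(text, pattern):
--     last = build_last(pattern)
--     m = len(pattern)
--     n = len(text)
--     i = m - 1
--     if i > n - 1:
--         return -1
--
--     j = m - 1
--     while (i <= n - 1):
--         if pattern[j] == text[i]:
--             if j == 0:
--                 return i
--             else:
--                 i = i - 1
--                 j = j - 1
--         else:
--             lo = last[ord(text[i])]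
--             i = i + m - min(j, i + lo)
--             j = m - 1
--     return -1
--
-- def find_done_keyword(text):
--     listkata = ['selesai', 'done', 'udah', 'kumpul']
--     idx = -1
--     i = 0
--     while (i < len(listkata)):
--         idx = boyer_moore(text, listkata[i])
--         if idx != -1:
--             break
--         else:
--             i = i + 1
--     return idx
-- ===== SOURCE B (Python) =====
-- def find_done_keyword(text):
--     for kw in ['selesai', 'done', 'udah', 'kumpul']:
--         idx = text.find(kw)
--         if idx != -1:
--             return idx
--     return -1
-- ===== Notes on version B (the rewrite author's own statement) =====
-- stated objective: simpler
-- what changed: Replaces the hand-written Boyer-Moore matcher (build_last table plus shift loop) with Python's built-in str.find per keyword, keeping the first-keyword-in-list tie-break.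
import Mathlib
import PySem

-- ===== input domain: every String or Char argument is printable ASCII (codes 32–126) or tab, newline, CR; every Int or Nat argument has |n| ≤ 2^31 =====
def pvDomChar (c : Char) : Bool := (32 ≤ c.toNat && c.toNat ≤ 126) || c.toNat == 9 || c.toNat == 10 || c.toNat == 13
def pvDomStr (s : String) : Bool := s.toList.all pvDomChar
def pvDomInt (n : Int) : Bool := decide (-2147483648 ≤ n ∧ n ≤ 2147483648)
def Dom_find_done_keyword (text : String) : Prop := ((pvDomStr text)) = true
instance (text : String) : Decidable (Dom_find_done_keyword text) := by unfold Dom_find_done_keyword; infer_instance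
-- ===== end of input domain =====

-- B replaces A's hand-written Boyer-Moore matcher (build_last table + shift loop) with the
-- built-in substring search (Python str.find / PySem.Str.find) per keyword; objective: simpler.

-- ===== PORT A =====
-- last = [-1]*128; for i in range(len(pattern)): last[ord(pattern[i])] = i
-- (pattern[i] is in range for every i the range produces, so the getD default is never used)
def build_last (pattern : List Char) : List Int :=
  (List.range pattern.length).foldl
    (fun last i => last.set (pattern.getD i 'a').toNat (i : Int))
    (List.replicate 128 (-1))

-- the while-loop of boyer_moore; the fuel only makes the recursion structural — with the
-- fuel boyer_mooore supplies it is never exhausted (established by the lemmas below).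
-- pattern[j] / text[i] are in range in every reachable state, so the getD defaults are never used;
-- last[ord(text[i])] out of range (non-ASCII text, where Python raises) yields -1, outside Dom.

def bmLoop (t p : List Char) (last : List Int) : Nat → Int → Int → Int
  | 0, _, _ => -1
  | fuel+1, i, j =>
    if i ≤ (t.length : Int) - 1 then
      if p.getD j.toNat 'a' = t.getD i.toNat 'a' then
        if j = 0 then i
        else bmLoop t p last fuel (i - 1) (j - 1)
      else
        let lo := last.getD (t.getD i.toNat 'a').toNat (-1)
        bmLoop t p last fuel (i + (p.length : Int) - min (j : Int) (i + lo)) ((p.length : Int) - 1)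
    else -1

def boyer_moore (text pattern : String) : Int :=
  let t := text.toList
  let p := pattern.toList
  let last := build_last p
  let m := p.length
  let n := t.length
  if (m : Int) - 1 > (n : Int) - 1 then -1
  else bmLoop t p last ((n + 2) * (m + 2)) ((m : Int) - 1) ((m : Int) - 1)

-- while i < len(listkata): idx = boyer_moore(text, listkata[i]); if idx != -1: break; i += 1

def fdkLoop (text : String) (kws : List String) (idx : Int) : Int :=
  match kws with
  | [] => idx
  | kw :: rest =>
    let idx' := boyer_moore text kw
    if idx' ≠ -1 then idx' else fdkLoop text rest idx'

def find_done_keyword (text : String) : Int :=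
  fdkLoop text ["selesai", "done", "udah", "kumpul"] (-1)

-- ===== PORT B =====

def altLoop (text : String) : List String → Int
  | [] => -1
  | kw :: rest =>
    let idx := PySem.Str.find text kw
    if idx ≠ -1 then idx else altLoop text rest

def find_done_keyword_alt (text : String) : Int :=
  altLoop text ["selesai", "done", "udah", "kumpul"]

-- ===== PRECONDITION & SPEC =====
def Spec_find_done_keyword (text : String) (out : Int) : Prop := out = find_done_keyword_alt text
instance (text : String) (out : Int) : Decidable (Spec_find_done_keyword text out) := by unfold Spec_find_done_keyword; infer_instance

-- ===== CLAIM (what is proved, stated in full; the proofs are below) =====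
def Claim_equal_find_done_keyword : Prop := ∀ (text : String), Dom_find_done_keyword text → Spec_find_done_keyword text (find_done_keyword text)

-- ===== LEMMAS AND PROOFS =====

-- the facts about the bad-character table that the loop proof needs, stated with bounded
-- quantifiers so they are decidable for each (literal) keyword

def lastOK (p : List Char) : Prop :=
  (build_last p).length = 128 ∧
  (∀ k < p.length, (p.getD k 'a').toNat < 128) ∧
  (∀ d < 128,
    -1 ≤ (build_last p).getD d (-1) ∧
    ∀ k < p.length, (p.getD k 'a').toNat = d → (k : Int) ≤ (build_last p).getD d (-1))

lemma last_facts (p : List Char) (h : lastOK p) (c : Char) :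
    -1 ≤ (build_last p).getD c.toNat (-1) ∧
    ∀ k < p.length, p.getD k 'a' = c → (k : Int) ≤ (build_last p).getD c.toNat (-1) := by
  obtain ⟨hlen, hascii, hmain⟩ := h
  by_cases hc : c.toNat < 128
  · obtain ⟨h1, h2⟩ := hmain c.toNat hc
    exact ⟨h1, fun k hk hke => h2 k hk (by rw [hke])⟩
  · have hdef : (build_last p).getD c.toNat (-1) = -1 :=
      List.getD_eq_default _ _ (by omega)
    rw [hdef]
    refine ⟨le_refl _, fun k hk hke => ?_⟩
    exact absurd (hke ▸ hascii k hk) (by omega)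
lemma prefix_drop_iff (p t : List Char) (hp : 0 < p.length) (s : ℕ) :
    p <+: t.drop s ↔ s + p.length ≤ t.length ∧ ∀ k < p.length, p.getD k 'a' = t.getD (s + k) 'a' := by
  constructor
  · intro h
    have hlen := h.length_le
    simp only [List.length_drop] at hlen
    have hsn : s + p.length ≤ t.length := by omega
    refine ⟨hsn, fun k hk => ?_⟩
    have h1 : p[k]'hk = (t.drop s)[k]'(by exact hk.trans_le h.length_le) := List.IsPrefix.getElem h hk
    have h2 : (t.drop s)[k]'(by exact hk.trans_le h.length_le) = t[s+k]'(by omega) := List.getElem_drop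
    rw [List.getD_eq_getElem p 'a' hk, List.getD_eq_getElem t 'a' (by omega : s + k < t.length), h1, h2]
  · rintro ⟨hsn, hall⟩
    rw [List.prefix_iff_eq_take]
    apply List.ext_getElem
    · simp; omega
    · intro k hk1 hk2
      have hk : k < p.length := hk1
      have h2 : ((t.drop s).take p.length)[k]'hk2 = t[s+k]'(by omega) := by
        rw [List.getElem_take]; exact List.getElem_drop
      rw [h2]
      have := hall k hk
      rwa [List.getD_eq_getElem p 'a' hk, List.getD_eq_getElem t 'a' (by omega : s + k < t.length)] at this

lemma find_eq_of_first (p t : List Char) (s : ℕ)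
    (h1 : p <+: t.drop s) (h2 : ∀ s' < s, ¬ p <+: t.drop s') :
    PySem.Chars.find t p = (s : Int) := by
  have hinf : p <:+: t := by
    rw [← PySem.Chars.isIn_iff_infix, ← PySem.Chars.exists_prefix_drop_iff_isIn]
    exact ⟨s, h1⟩
  have hnn : 0 ≤ PySem.Chars.find t p := (PySem.Chars.find_nonneg_iff t p).mpr hinf
  obtain ⟨hpre, hmin⟩ := PySem.Chars.find_spec hnn
  have hge : s ≤ (PySem.Chars.find t p).toNat := by
    by_contra hlt
    exact h2 _ (by omega) hpre
  have hle : (PySem.Chars.find t p).toNat ≤ s := by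
    by_contra hlt
    exact hmin s (by omega) h1
  omega

lemma find_eq_neg_one_of (p t : List Char) (h : ∀ s : ℕ, ¬ p <+: t.drop s) :
    PySem.Chars.find t p = -1 := by
  rw [PySem.Chars.find_eq_neg_one_iff]
  intro hinf
  have := (PySem.Chars.exists_prefix_drop_iff_isIn p t).mpr ((PySem.Chars.isIn_iff_infix p t).mpr hinf)
  obtain ⟨j, hj⟩ := this
  exact h j hj

lemma bmLoop_eq (p : List Char) (hOK : lastOK p) (hm2 : 2 ≤ p.length)
    (hnc : ∃ k, k + 1 < p.length ∧ p.getD k 'a' ≠ p.getD (k+1) 'a')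
    (t : List Char) :
    ∀ fuel s j : ℕ, j < p.length →
      (j + 1 < p.length → s + p.length ≤ t.length) →
      (∀ k, j < k → k < p.length → p.getD k 'a' = t.getD (s + k) 'a') →
      (∀ s' : ℕ, s' < s → ¬ p <+: t.drop s') →
      (t.length + 1 - s) * (p.length + 1) + j + 1 ≤ fuel →
      bmLoop t p (build_last p) fuel ((s + j : ℕ) : Int) ((j : ℕ) : Int) = PySem.Chars.find t p := by
  intro fuel
  induction fuel with
  | zero =>
    intro s j _ _ _ _ hfuel
    exfalso
    generalize (t.length + 1 - s) * (p.length + 1) = X at hfuel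
    omega
  | succ fuel IH =>
    intro s j hjm hsm hpartial hnoocc hfuel
    set m := p.length with hm
    set n := t.length with hn
    simp only [bmLoop]
    by_cases hcond : s + j < n
    · rw [if_pos (by push_cast; omega)]
      have htn1 : ((s + j : ℕ) : Int).toNat = s + j := by omega
      have htn2 : ((j : ℕ) : Int).toNat = j := by omega
      rw [htn1, htn2]
      by_cases hmatch : p.getD j 'a' = t.getD (s + j) 'a'
      · rw [if_pos hmatch]
        by_cases hj0 : j = 0
        · subst hj0
          rw [if_pos (by norm_num)]
          have hocc : p <+: t.drop s := by
            rw [prefix_drop_iff p t (by omega) s]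
            refine ⟨hsm (by omega), fun k hk => ?_⟩
            rcases Nat.eq_zero_or_pos k with hk0 | hk0
            · subst hk0; exact hmatch
            · exact hpartial k hk0 hk
          rw [find_eq_of_first p t s hocc hnoocc]; norm_num
        · rw [if_neg (by exact_mod_cast hj0)]
          have e1 : ((s + j : ℕ) : Int) - 1 = ((s + (j - 1) : ℕ) : Int) := by omega
          have e2 : ((j : ℕ) : Int) - 1 = (((j - 1) : ℕ) : Int) := by omega
          rw [e1, e2]
          apply IH s (j - 1) (by omega)
          · intro _
            by_cases hj1 : j + 1 < m
            · exact hsm hj1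
            · omega
          · intro k hk1 hk2
            rcases Nat.eq_or_lt_of_le (Nat.succ_le_of_lt hk1) with hkj | hkj
            · have : k = j := by omega
              subst this; exact hmatch
            · exact hpartial k (by omega) hk2
          · exact hnoocc
          · have key : n + 1 - s = (n - s) + 1 := by omega
            rw [key, Nat.succ_mul] at hfuel ⊢
            generalize (n - s) * (m + 1) = X at hfuel ⊢
            omega
      · rw [if_neg hmatch]
        obtain ⟨hlo1, hlo2⟩ := last_facts p hOK (t.getD (s + j) 'a')
        rw [← hm] at hlo2
        set lo := (build_last p).getD (t.getD (s + j) 'a').toNat (-1) with hlodef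
        by_cases hbr : ((j : ℕ) : Int) ≤ ((s + j : ℕ) : Int) + lo
        · rw [min_eq_left hbr]
          have e1 : ((s + j : ℕ) : Int) + (m : Int) - ((j : ℕ) : Int) = (((s + 1) + (m - 1) : ℕ) : Int) := by omega
          have e2 : (m : Int) - 1 = (((m - 1) : ℕ) : Int) := by omega
          rw [e1, e2]
          apply IH (s + 1) (m - 1) (by omega)
          · intro h; omega
          · intro k hk1 hk2; omega
          · intro s' hs'
            rcases Nat.lt_succ_iff_lt_or_eq.mp hs' with h | h
            · exact hnoocc s' h
            · subst h
              intro hpre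
              have hall := (prefix_drop_iff p t (by omega) s').mp hpre
              exact hmatch (hall.2 j hjm)
          · have hsn : s < n := by omega
            have key : n + 1 - s = (n - s) + 1 := by omega
            have key2 : n + 1 - (s + 1) = n - s := by omega
            rw [key, Nat.succ_mul] at hfuel
            rw [key2]
            generalize (n - s) * (m + 1) = X at hfuel ⊢
            omega
        · have hs0 : s = 0 ∧ lo = -1 := by omega
          obtain ⟨hs0, hlom1⟩ := hs0
          subst hs0
          have hcnot : ∀ k < m, p.getD k 'a' ≠ t.getD (0 + j) 'a' := by
            intro k hk he
            have := hlo2 k hk he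
            omega
          rw [min_eq_right (by omega), hlom1]
          have e1 : ((0 + j : ℕ) : Int) + (m : Int) - (((0 + j : ℕ) : Int) + -1) = ((2 + (m - 1) : ℕ) : Int) := by omega
          have e2 : (m : Int) - 1 = (((m - 1) : ℕ) : Int) := by omega
          rw [e1, e2]
          apply IH 2 (m - 1) (by omega)
          · intro h; omega
          · intro k hk1 hk2; omega
          · intro s' hs'
            interval_cases s'
            · intro hpre
              have hall := (prefix_drop_iff p t (by omega) 0).mp hpre
              have := hall.2 j hjm
              exact hcnot j hjm this
            · intro hpre
              have hall := (prefix_drop_iff p t (by omega) 1).mp hpre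
              by_cases hj1 : 1 ≤ j
              · have h := hall.2 (j - 1) (by omega)
                have e : 1 + (j - 1) = 0 + j := by omega
                rw [e] at h
                exact hcnot (j - 1) (by omega) h
              · have hj0 : j = 0 := by omega
                subst hj0
                obtain ⟨k0, hk0, hne⟩ := hnc
                have ha := hall.2 k0 (by omega)
                have hb := hpartial (k0 + 1) (by omega) (by omega)
                have e : 1 + k0 = 0 + (k0 + 1) := by omega
                rw [e] at ha
                exact hne (ha.trans hb.symm)
          · have hn1 : 1 ≤ n := by omega
            have key : n + 1 - 0 = (n - 1) + 2 := by omega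
            have key2 : n + 1 - 2 = n - 1 := by omega
            rw [key, Nat.add_mul] at hfuel
            rw [key2]
            generalize (n - 1) * (m + 1) = X at hfuel ⊢
            omega
    · rw [if_neg (by push_cast; omega)]
      symm
      apply find_eq_neg_one_of
      intro s' hpre
      have hall := (prefix_drop_iff p t (by omega) s').mp hpre
      by_cases hs : s' < s
      · exact hnoocc s' hs hpre
      · omega

lemma bm_eq_find (kw : String) (hOK : lastOK kw.toList) (hm2 : 2 ≤ kw.toList.length)
    (hnc : ∃ k, k + 1 < kw.toList.length ∧ kw.toList.getD k 'a' ≠ kw.toList.getD (k+1) 'a')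
    (text : String) :
    boyer_moore text kw = PySem.Str.find text kw := by
  have hfind : PySem.Str.find text kw = PySem.Chars.find text.toList kw.toList := by
    simp [PySem.Str.find_eq]
  rw [hfind]
  set p := kw.toList
  set t := text.toList
  set m := p.length with hm
  set n := t.length with hn
  simp only [boyer_moore]
  by_cases hguard : (m : Int) - 1 > (n : Int) - 1
  · rw [if_pos hguard]
    symm
    apply find_eq_neg_one_of
    intro s' hpre
    have hall := (prefix_drop_iff p t (by omega) s').mp hpre
    omega
  · rw [if_neg hguard]
    have e2 : (m : Int) - 1 = (((m - 1) : ℕ) : Int) := by omega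
    have key := bmLoop_eq p hOK hm2 hnc t ((n + 2) * (m + 2)) 0 (m - 1) (by omega)
      (by intro h; omega) (by intro k hk1 hk2; omega) (by intro s' hs'; omega)
      (by
        have e : n + 1 - 0 = n + 1 := by omega
        rw [e]
        have h1 : (n + 1) * (m + 1) + (m - 1) + 1 ≤ (n + 2) * (m + 1) := by
          have e2 : (n + 2) * (m + 1) = (n + 1) * (m + 1) + (m + 1) := by ring
          rw [e2]; generalize (n + 1) * (m + 1) = X; omega
        exact h1.trans (Nat.mul_le_mul_left _ (by omega)))
    simp only [Nat.zero_add] at key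
    rw [e2]
    exact key

set_option maxRecDepth 8000 in
lemma hOK_selesai : lastOK "selesai".toList := by
  refine ⟨by decide, by decide, by decide⟩

set_option maxRecDepth 8000 in
lemma hOK_done : lastOK "done".toList := ⟨by decide, by decide, by decide⟩
set_option maxRecDepth 8000 in
lemma hOK_udah : lastOK "udah".toList := ⟨by decide, by decide, by decide⟩
set_option maxRecDepth 8000 in
lemma hOK_kumpul : lastOK "kumpul".toList := ⟨by decide, by decide, by decide⟩

-- ===== VERDICT (by name: the statement is the Claim_ definition above) =====
theorem find_done_keyword_spec : Claim_equal_find_done_keyword := by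
  intro text _
  unfold Spec_find_done_keyword
  have h1 := bm_eq_find "selesai" hOK_selesai (by decide) ⟨0, by decide, by decide⟩ text
  have h2 := bm_eq_find "done" hOK_done (by decide) ⟨0, by decide, by decide⟩ text
  have h3 := bm_eq_find "udah" hOK_udah (by decide) ⟨0, by decide, by decide⟩ text
  have h4 := bm_eq_find "kumpul" hOK_kumpul (by decide) ⟨0, by decide, by decide⟩ text
  simp only [find_done_keyword, find_done_keyword_alt, fdkLoop, altLoop, h1, h2, h3, h4]
  split_ifs <;> simp_all
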